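-- pv_equiv track=rewrite | github.com/231771725wang-cpu/style-compass | scripts/draft_ui_refactor_md.py | classify_pages
-- ===== SOURCE A (Python) =====
-- VISUAL_ONLY = {"landing-page", "brand-site", "marketing", "campaign", "product-site"}
--
-- DENSITY_TUNE = {"dashboard", "docs", "settings", "analytics", "commerce"}
--
-- REORDER = {"editor", "creative-tool", "workbench"}
--
-- def classify_pages(existing_pages: list[str]) -> dict[str, list[str]]:
--     mapping = {
--         "visual_only": [],
--         "density_and_hierarchy": [],
--         "reorder_modules": [],
--         "hold": [],
--     }
--     for page in existing_pages:
--         if page in VISUAL_ONLY: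
--             mapping["visual_only"].append(page)
--         elif page in DENSITY_TUNE:
--             mapping["density_and_hierarchy"].append(page)
--         elif page in REORDER:
--             mapping["reorder_modules"].append(page)
--         else:
--             mapping["hold"].append(page)
--     return mapping
-- ===== SOURCE B (Python) =====
-- # B: table-driven bucketing — one reverse-lookup dict, then a per-bucket filter
-- # (four comprehension passes) instead of A's single loop with an if/elif cascade.
-- VISUAL_ONLY = {"landing-page", "brand-site", "marketing", "campaign", "product-site"}
-- DENSITY_TUNE = {"dashboard", "docs", "settings", "analytics", "commerce"}
-- REORDER = {"editor", "creative-tool", "workbench"}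
--
-- LABEL_TO_BUCKET = {
--     "landing-page": "visual_only",
--     "brand-site": "visual_only",
--     "marketing": "visual_only",
--     "campaign": "visual_only",
--     "product-site": "visual_only",
--     "dashboard": "density_and_hierarchy",
--     "docs": "density_and_hierarchy",
--     "settings": "density_and_hierarchy",
--     "analytics": "density_and_hierarchy",
--     "commerce": "density_and_hierarchy",
--     "editor": "reorder_modules",
--     "creative-tool": "reorder_modules",
--     "workbench": "reorder_modules",
-- }
--
-- BUCKETS = ("visual_only", "density_and_hierarchy", "reorder_modules", "hold")
--
-- def classify_pages(existing_pages: list[str]) -> dict[str, list[str]]: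
--     return {
--         bucket: [p for p in existing_pages
--                  if LABEL_TO_BUCKET.get(p, "hold") == bucket]
--         for bucket in BUCKETS
--     }
-- ===== Notes on version B (the rewrite author's own statement) =====
-- stated objective: idiomatic
-- what changed: Replaces the single loop with an if/elif set-membership cascade by a reverse-lookup table LABEL_TO_BUCKET plus a dict comprehension that builds each bucket with its own order-preserving filter pass.
import Mathlib
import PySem

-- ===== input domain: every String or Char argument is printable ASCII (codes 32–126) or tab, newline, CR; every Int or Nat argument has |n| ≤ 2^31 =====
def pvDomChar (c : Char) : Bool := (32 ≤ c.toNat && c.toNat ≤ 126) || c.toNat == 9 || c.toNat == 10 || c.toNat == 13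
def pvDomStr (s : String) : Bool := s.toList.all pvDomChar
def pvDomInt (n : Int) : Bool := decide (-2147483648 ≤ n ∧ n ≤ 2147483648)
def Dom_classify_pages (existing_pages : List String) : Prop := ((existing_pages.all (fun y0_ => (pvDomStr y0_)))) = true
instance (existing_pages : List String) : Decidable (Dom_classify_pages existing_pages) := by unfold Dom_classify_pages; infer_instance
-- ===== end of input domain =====

-- B replaces A's if/elif membership cascade with a reverse-lookup table and a
-- per-bucket filter pass (idiomatic, same cost); return-value equivalence proved.


-- ===== PORT A =====
def pvVISUAL_ONLY : List String := ["landing-page", "brand-site", "marketing", "campaign", "product-site"]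
def pvDENSITY_TUNE : List String := ["dashboard", "docs", "settings", "analytics", "commerce"]
def pvREORDER : List String := ["editor", "creative-tool", "workbench"]

def classify_pages (existing_pages : List String) : List (String × List String) :=
  let mapping : PySem.Dict String (List String) :=
    PySem.Dict.ofList [("visual_only", []), ("density_and_hierarchy", []),
                       ("reorder_modules", []), ("hold", [])]
  let mapping := existing_pages.foldl (fun m page =>
    if pvVISUAL_ONLY.contains page then
      m.modify "visual_only" [] (· ++ [page])
    else if pvDENSITY_TUNE.contains page then
      m.modify "density_and_hierarchy" [] (· ++ [page])
    else if pvREORDER.contains page then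
      m.modify "reorder_modules" [] (· ++ [page])
    else
      m.modify "hold" [] (· ++ [page])) mapping
  mapping.items

-- ===== PORT B =====
def pvLABEL_TO_BUCKET : PySem.Dict String String :=
  PySem.Dict.ofList [
    ("landing-page", "visual_only"), ("brand-site", "visual_only"),
    ("marketing", "visual_only"), ("campaign", "visual_only"),
    ("product-site", "visual_only"),
    ("dashboard", "density_and_hierarchy"), ("docs", "density_and_hierarchy"),
    ("settings", "density_and_hierarchy"), ("analytics", "density_and_hierarchy"),
    ("commerce", "density_and_hierarchy"),
    ("editor", "reorder_modules"), ("creative-tool", "reorder_modules"),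
    ("workbench", "reorder_modules")]

def pvBUCKETS : List String := ["visual_only", "density_and_hierarchy", "reorder_modules", "hold"]

def classify_pages_alt (existing_pages : List String) : List (String × List String) :=
  pvBUCKETS.map (fun bucket =>
    (bucket, existing_pages.filter (fun p => pvLABEL_TO_BUCKET.getD p "hold" == bucket)))

-- ===== PRECONDITION & SPEC =====
def Spec_classify_pages (existing_pages : List String) (out : List (String × List String)) : Prop := out = classify_pages_alt existing_pages
instance (existing_pages : List String) (out : List (String × List String)) : Decidable (Spec_classify_pages existing_pages out) := by unfold Spec_classify_pages; infer_instance

-- ===== CLAIM (what is proved, stated in full; the proofs are below) =====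
def Claim_equal_classify_pages : Prop := ∀ (existing_pages : List String), Dom_classify_pages existing_pages → Spec_classify_pages existing_pages (classify_pages existing_pages)

-- ===== LEMMAS AND PROOFS =====

-- the bucket A's cascade assigns, as a function of the page
def pvCascade (p : String) : String :=
  if pvVISUAL_ONLY.contains p then "visual_only"
  else if pvDENSITY_TUNE.contains p then "density_and_hierarchy"
  else if pvREORDER.contains p then "reorder_modules"
  else "hold"

lemma table_mk : pvLABEL_TO_BUCKET = PySem.Dict.mk [
    ("landing-page", "visual_only"), ("brand-site", "visual_only"),
    ("marketing", "visual_only"), ("campaign", "visual_only"),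
    ("product-site", "visual_only"),
    ("dashboard", "density_and_hierarchy"), ("docs", "density_and_hierarchy"),
    ("settings", "density_and_hierarchy"), ("analytics", "density_and_hierarchy"),
    ("commerce", "density_and_hierarchy"),
    ("editor", "reorder_modules"), ("creative-tool", "reorder_modules"),
    ("workbench", "reorder_modules")] := by rfl

lemma bucket_table_eq_cascade (p : String) :
    pvLABEL_TO_BUCKET.getD p "hold" = pvCascade p := by
  by_cases e0 : p = "landing-page"
  · subst e0; rfl
  by_cases e1 : p = "brand-site"
  · subst e1; rfl
  by_cases e2 : p = "marketing"
  · subst e2; rfl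
  by_cases e3 : p = "campaign"
  · subst e3; rfl
  by_cases e4 : p = "product-site"
  · subst e4; rfl
  by_cases e5 : p = "dashboard"
  · subst e5; rfl
  by_cases e6 : p = "docs"
  · subst e6; rfl
  by_cases e7 : p = "settings"
  · subst e7; rfl
  by_cases e8 : p = "analytics"
  · subst e8; rfl
  by_cases e9 : p = "commerce"
  · subst e9; rfl
  by_cases e10 : p = "editor"
  · subst e10; rfl
  by_cases e11 : p = "creative-tool"
  · subst e11; rfl
  by_cases e12 : p = "workbench"
  · subst e12; rfl
  rw [table_mk]
  simp [PySem.Dict.getD_eq_get?_getD, pvCascade,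
    pvVISUAL_ONLY, pvDENSITY_TUNE, pvREORDER, PySem.Dict.get?, e0, Ne.symm e0, e1, Ne.symm e1, e2, Ne.symm e2, e3, Ne.symm e3, e4, Ne.symm e4, e5, Ne.symm e5, e6, Ne.symm e6, e7, Ne.symm e7, e8, Ne.symm e8, e9, Ne.symm e9, e10, Ne.symm e10, e11, Ne.symm e11, e12, Ne.symm e12]

def pvStep (m : PySem.Dict String (List String)) (page : String) :
    PySem.Dict String (List String) :=
  if pvVISUAL_ONLY.contains page then
    m.modify "visual_only" [] (· ++ [page])
  else if pvDENSITY_TUNE.contains page then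
    m.modify "density_and_hierarchy" [] (· ++ [page])
  else if pvREORDER.contains page then
    m.modify "reorder_modules" [] (· ++ [page])
  else
    m.modify "hold" [] (· ++ [page])

lemma mod1 (a b c d : List String) (x : String) :
    (PySem.Dict.mk [("visual_only", a), ("density_and_hierarchy", b),
      ("reorder_modules", c), ("hold", d)]).modify "visual_only" [] (· ++ [x]) =
    PySem.Dict.mk [("visual_only", a ++ [x]), ("density_and_hierarchy", b),
      ("reorder_modules", c), ("hold", d)] := by rfl

lemma mod2 (a b c d : List String) (x : String) :
    (PySem.Dict.mk [("visual_only", a), ("density_and_hierarchy", b),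
      ("reorder_modules", c), ("hold", d)]).modify "density_and_hierarchy" [] (· ++ [x]) =
    PySem.Dict.mk [("visual_only", a), ("density_and_hierarchy", b ++ [x]),
      ("reorder_modules", c), ("hold", d)] := by rfl

lemma mod3 (a b c d : List String) (x : String) :
    (PySem.Dict.mk [("visual_only", a), ("density_and_hierarchy", b),
      ("reorder_modules", c), ("hold", d)]).modify "reorder_modules" [] (· ++ [x]) =
    PySem.Dict.mk [("visual_only", a), ("density_and_hierarchy", b),
      ("reorder_modules", c ++ [x]), ("hold", d)] := by rfl

lemma mod4 (a b c d : List String) (x : String) :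
    (PySem.Dict.mk [("visual_only", a), ("density_and_hierarchy", b),
      ("reorder_modules", c), ("hold", d)]).modify "hold" [] (· ++ [x]) =
    PySem.Dict.mk [("visual_only", a), ("density_and_hierarchy", b),
      ("reorder_modules", c), ("hold", d ++ [x])] := by rfl

lemma step1 (a b c d : List String) (p : String) (h1 : pvVISUAL_ONLY.contains p = true) :
    pvStep (PySem.Dict.mk [("visual_only", a), ("density_and_hierarchy", b),
      ("reorder_modules", c), ("hold", d)]) p =
    PySem.Dict.mk [("visual_only", a ++ [p]), ("density_and_hierarchy", b),
      ("reorder_modules", c), ("hold", d)] := by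
  unfold pvStep; rw [if_pos h1]; exact mod1 a b c d p

lemma step2 (a b c d : List String) (p : String) (h1 : ¬ pvVISUAL_ONLY.contains p = true)
    (h2 : pvDENSITY_TUNE.contains p = true) :
    pvStep (PySem.Dict.mk [("visual_only", a), ("density_and_hierarchy", b),
      ("reorder_modules", c), ("hold", d)]) p =
    PySem.Dict.mk [("visual_only", a), ("density_and_hierarchy", b ++ [p]),
      ("reorder_modules", c), ("hold", d)] := by
  unfold pvStep; rw [if_neg h1, if_pos h2]; exact mod2 a b c d p

lemma step3 (a b c d : List String) (p : String) (h1 : ¬ pvVISUAL_ONLY.contains p = true)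
    (h2 : ¬ pvDENSITY_TUNE.contains p = true) (h3 : pvREORDER.contains p = true) :
    pvStep (PySem.Dict.mk [("visual_only", a), ("density_and_hierarchy", b),
      ("reorder_modules", c), ("hold", d)]) p =
    PySem.Dict.mk [("visual_only", a), ("density_and_hierarchy", b),
      ("reorder_modules", c ++ [p]), ("hold", d)] := by
  unfold pvStep; rw [if_neg h1, if_neg h2, if_pos h3]; exact mod3 a b c d p

lemma step4 (a b c d : List String) (p : String) (h1 : ¬ pvVISUAL_ONLY.contains p = true)
    (h2 : ¬ pvDENSITY_TUNE.contains p = true) (h3 : ¬ pvREORDER.contains p = true) :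
    pvStep (PySem.Dict.mk [("visual_only", a), ("density_and_hierarchy", b),
      ("reorder_modules", c), ("hold", d)]) p =
    PySem.Dict.mk [("visual_only", a), ("density_and_hierarchy", b),
      ("reorder_modules", c), ("hold", d ++ [p])] := by
  unfold pvStep; rw [if_neg h1, if_neg h2, if_neg h3]; exact mod4 a b c d p

lemma fold_char (pages : List String) (a b c d : List String) :
    pages.foldl pvStep
      (PySem.Dict.mk [("visual_only", a), ("density_and_hierarchy", b),
                      ("reorder_modules", c), ("hold", d)]) =
    PySem.Dict.mk
      [("visual_only", a ++ pages.filter (fun p => pvCascade p == "visual_only")),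
       ("density_and_hierarchy", b ++ pages.filter (fun p => pvCascade p == "density_and_hierarchy")),
       ("reorder_modules", c ++ pages.filter (fun p => pvCascade p == "reorder_modules")),
       ("hold", d ++ pages.filter (fun p => pvCascade p == "hold"))] := by
  induction pages generalizing a b c d with
  | nil => simp
  | cons p rest ih =>
    simp only [List.foldl_cons, List.filter_cons]
    by_cases h1 : pvVISUAL_ONLY.contains p
    · have m1 : p ∈ pvVISUAL_ONLY := by simpa using h1
      rw [step1 a b c d p h1, ih]
      simp [pvCascade, m1]
    · have m1 : p ∉ pvVISUAL_ONLY := by simpa using h1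
      by_cases h2 : pvDENSITY_TUNE.contains p
      · have m2 : p ∈ pvDENSITY_TUNE := by simpa using h2
        rw [step2 a b c d p h1 h2, ih]
        simp [pvCascade, m1, m2]
      · have m2 : p ∉ pvDENSITY_TUNE := by simpa using h2
        by_cases h3 : pvREORDER.contains p
        · have m3 : p ∈ pvREORDER := by simpa using h3
          rw [step3 a b c d p h1 h2 h3, ih]
          simp [pvCascade, m1, m2, m3]
        · have m3 : p ∉ pvREORDER := by simpa using h3
          rw [step4 a b c d p h1 h2 h3, ih]
          simp [pvCascade, m1, m2, m3]

-- ===== VERDICT (by name: the statement is the Claim_ definition above) =====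
theorem classify_pages_spec : Claim_equal_classify_pages := by
  intro xs _
  unfold Spec_classify_pages classify_pages classify_pages_alt
  rw [show PySem.Dict.ofList [("visual_only", ([] : List String)), ("density_and_hierarchy", []),
        ("reorder_modules", []), ("hold", [])] =
      PySem.Dict.mk [("visual_only", []), ("density_and_hierarchy", []),
        ("reorder_modules", []), ("hold", [])] from rfl]
  rw [show (fun (m : PySem.Dict String (List String)) (page : String) =>
      if pvVISUAL_ONLY.contains page then
        m.modify "visual_only" [] (· ++ [page])
      else if pvDENSITY_TUNE.contains page then
        m.modify "density_and_hierarchy" [] (· ++ [page])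
      else if pvREORDER.contains page then
        m.modify "reorder_modules" [] (· ++ [page])
      else
        m.modify "hold" [] (· ++ [page])) = pvStep from rfl]
  show (List.foldl pvStep
      (PySem.Dict.mk [("visual_only", []), ("density_and_hierarchy", []),
        ("reorder_modules", []), ("hold", [])]) xs).items =
    List.map (fun bucket => (bucket, List.filter (fun p => pvLABEL_TO_BUCKET.getD p "hold" == bucket) xs)) pvBUCKETS
  rw [fold_char]
  simp only [pvBUCKETS, List.map_cons, List.map_nil, List.nil_append]
  simp [bucket_table_eq_cascade]
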